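-- pv_equiv track=rewrite | github.com/SI201-UMich/fall25-project1-jamiekornblum | code/code.py | calculate_coffees_sold_per_type
-- ===== SOURCE A (Python) =====
-- def calculate_coffees_sold_per_type(data):
--     """Calculate the number of coffees sold for each coffee type"""
--     coffee_counts = {}
--     for row in data:
--         coffee = row['coffee_name']
--         if coffee not in coffee_counts:
--             coffee_counts[coffee] = 0
--         coffee_counts[coffee] += 1
--     return coffee_counts
-- ===== SOURCE B (Python) =====
-- def calculate_coffees_sold_per_type(data):
--     """Calculate the number of coffees sold for each coffee type"""
--     names = [row['coffee_name'] for row in data]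
--     return {name: names.count(name) for name in dict.fromkeys(names)}
-- ===== Notes on version B (the rewrite author's own statement) =====
-- stated objective: alternative
-- what changed: Replaces the one-pass dict-counting loop by a two-pass decomposition: extract all names, deduplicate them in first-occurrence order (dict.fromkeys), and build the result with a dict comprehension counting each distinct name via list.count.
import Mathlib
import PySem

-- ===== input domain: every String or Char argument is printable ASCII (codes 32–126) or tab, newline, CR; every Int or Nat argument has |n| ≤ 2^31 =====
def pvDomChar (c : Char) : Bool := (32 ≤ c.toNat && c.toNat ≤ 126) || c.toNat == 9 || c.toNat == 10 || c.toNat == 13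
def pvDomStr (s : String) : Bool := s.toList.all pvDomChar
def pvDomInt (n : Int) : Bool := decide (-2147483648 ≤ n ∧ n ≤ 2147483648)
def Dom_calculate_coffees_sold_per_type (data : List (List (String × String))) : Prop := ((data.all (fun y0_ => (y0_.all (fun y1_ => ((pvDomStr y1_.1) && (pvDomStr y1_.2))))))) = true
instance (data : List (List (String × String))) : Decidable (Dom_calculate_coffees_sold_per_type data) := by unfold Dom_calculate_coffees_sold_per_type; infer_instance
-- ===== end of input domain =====

-- B counts per coffee type by dedup + list.count (two passes) instead of A's incremental dict counting;
-- equivalence is about the return value (neither version mutates its argument).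

-- ===== PORT A =====
-- row['coffee_name'] raises KeyError when the key is missing; Pre_ excludes that, the port uses getD "" there.
def calculate_coffees_sold_per_type (data : List (List (String × String))) : List (String × Int) :=
  (data.foldl (fun coffee_counts row =>
      let coffee := ((PySem.Dict.mk row).get? "coffee_name").getD ""
      let coffee_counts :=
        if coffee_counts.contains coffee then coffee_counts
        else coffee_counts.insert coffee 0
      coffee_counts.insert coffee (coffee_counts.getD coffee 0 + 1))
    PySem.Dict.empty).items

-- ===== PORT B =====
def calculate_coffees_sold_per_type_alt (data : List (List (String × String))) : List (String × Int) :=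
  let names := data.map (fun row => ((PySem.Dict.mk row).get? "coffee_name").getD "")
  (PySem.List.dedup names).map (fun name => (name, (names.count name : Int)))

-- ===== PRECONDITION & SPEC =====
-- Pre_ excludes exactly the rows without a 'coffee_name' key, on which A (and B) raise KeyError.
def Pre_calculate_coffees_sold_per_type (data : List (List (String × String))) : Prop :=
  ∀ row ∈ data, (PySem.Dict.mk row).contains "coffee_name" = true
instance (data : List (List (String × String))) : Decidable (Pre_calculate_coffees_sold_per_type data) := by unfold Pre_calculate_coffees_sold_per_type; infer_instance

def pvWitness_calculate_coffees_sold_per_type : (List (List (String × String))) :=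
  [[("coffee_name", "Latte")], [("coffee_name", "Mocha")], [("coffee_name", "Latte")]]

def Spec_calculate_coffees_sold_per_type (data : List (List (String × String))) (out : List (String × Int)) : Prop := out = calculate_coffees_sold_per_type_alt data
instance (data : List (List (String × String))) (out : List (String × Int)) : Decidable (Spec_calculate_coffees_sold_per_type data out) := by unfold Spec_calculate_coffees_sold_per_type; infer_instance

-- ===== CLAIM (what is proved, stated in full; the proofs are below) =====
def Claim_equal_calculate_coffees_sold_per_type : Prop := ∀ (data : List (List (String × String))), Dom_calculate_coffees_sold_per_type data → Pre_calculate_coffees_sold_per_type data → Spec_calculate_coffees_sold_per_type data (calculate_coffees_sold_per_type data)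

-- ===== LEMMAS AND PROOFS =====

-- A's loop body (ensure key with 0, then += 1) is one counter insert.
theorem pv_step (d : PySem.Dict String Int) (k : String) :
    (let d' := if d.contains k then d else d.insert k 0
     d'.insert k (d'.getD k 0 + 1)) = d.insert k (d.getD k 0 + 1) := by
  by_cases h : d.contains k
  · simp [h]
  · simp only [h, Bool.false_eq_true, if_false]
    rw [PySem.Dict.insert_insert_self, PySem.Dict.getD_insert_self,
        PySem.Dict.getD_of_not_contains d 0 (by simpa using h)]

-- ===== VERDICT (by name: the statement is the Claim_ definition above) =====
theorem calculate_coffees_sold_per_type_spec : Claim_equal_calculate_coffees_sold_per_type := by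
  intro data _ _
  unfold Spec_calculate_coffees_sold_per_type
  unfold calculate_coffees_sold_per_type calculate_coffees_sold_per_type_alt
  have hfold :
      data.foldl (fun (coffee_counts : PySem.Dict String Int) row =>
          let coffee := ((PySem.Dict.mk row).get? "coffee_name").getD ""
          let coffee_counts :=
            if coffee_counts.contains coffee then coffee_counts
            else coffee_counts.insert coffee 0
          coffee_counts.insert coffee (coffee_counts.getD coffee 0 + 1))
        PySem.Dict.empty
      = (data.map (fun row => ((PySem.Dict.mk row).get? "coffee_name").getD "")).foldl
          (fun (d : PySem.Dict String Int) x => d.insert x (d.getD x 0 + 1)) PySem.Dict.empty := by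
    rw [List.foldl_map]
    exact PySem.List.foldl_congr_mem _ _ _ _ (fun d row _ => pv_step d _)
  refine (congrArg PySem.Dict.items hfold).trans ?_
  rw [PySem.Dict.foldl_insert_getD_add_one_eq_counter, PySem.Dict.items_counter]
  simp [PySem.List.dedup_eq_ofList]
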